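-- pv_equiv track=rewrite | github.com/Cheikh-Kane/Netcalc | calculatrice_reseau.py | calcul_sous_reseau_suivant
-- ===== SOURCE A (Python) =====
-- def calcul_sous_reseau_suivant(diffusion_prec):
--     reseau = diffusion_prec.copy()
--     for i in range(3, -1, -1):      #On part de l'octet le plus à droite
--         if reseau[i] < 255:
--             reseau[i] += 1      #On peut incrémenter
--             break
--         else:
--             reseau[i] = 0   #Incrémentation impossible: on met l'octet à 0 et on passe à l'octet suivant(de la droite vers la gauche)
--     return reseau
-- ===== SOURCE B (Python) =====
-- def calcul_sous_reseau_suivant(diffusion_prec):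
--     incrementables = [i for i in range(4) if diffusion_prec[i] < 255]
--     pivot = incrementables[-1] if incrementables else -1
--     return [octet + 1 if i == pivot else 0 if pivot < i <= 3 else octet
--             for i, octet in enumerate(diffusion_prec)]
-- ===== Notes on version B (the rewrite author's own statement) =====
-- stated objective: alternative
-- what changed: B replaces A's mutate-a-copy carry loop (zero octets right-to-left until one can be incremented) with a pivot computation: it finds the rightmost incrementable octet among the first four, then rebuilds the list in one comprehension (increment the pivot, zero octets after it, keep everything else); Pre_ excludes lists shorter than four elements, on which A raises IndexError.
import Mathlib
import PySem

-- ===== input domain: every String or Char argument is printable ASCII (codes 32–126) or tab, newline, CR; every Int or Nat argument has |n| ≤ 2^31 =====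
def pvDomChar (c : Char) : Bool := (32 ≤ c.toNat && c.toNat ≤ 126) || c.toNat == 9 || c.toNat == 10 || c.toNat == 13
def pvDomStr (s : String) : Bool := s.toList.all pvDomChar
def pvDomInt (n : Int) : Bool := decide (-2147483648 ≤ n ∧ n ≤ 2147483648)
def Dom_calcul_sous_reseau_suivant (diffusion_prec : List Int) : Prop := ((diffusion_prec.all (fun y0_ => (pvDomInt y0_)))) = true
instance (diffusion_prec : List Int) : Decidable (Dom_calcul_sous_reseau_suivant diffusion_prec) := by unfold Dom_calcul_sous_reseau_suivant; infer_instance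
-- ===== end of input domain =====

-- B finds the rightmost incrementable octet (the pivot) and rebuilds the list in one pass, instead of A's copy-and-mutate carry loop; alternative algorithm, same cost.

-- ===== PORT A =====
-- A's for-loop over range(3,-1,-1) with break, mutating the copy `reseau`
def calcA_loop (reseau : List Int) (idxs : List Int) : List Int :=
  match idxs with
  | [] => reseau
  | i :: rest =>
    let v := PySem.List.pyGetD reseau i 0
    if v < 255 then PySem.List.pySetD reseau i (v + 1)
    else calcA_loop (PySem.List.pySetD reseau i 0) rest

def calcul_sous_reseau_suivant (diffusion_prec : List Int) : List Int :=
  calcA_loop diffusion_prec (PySem.List.pyRange 3 (-1) (-1))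

-- ===== PORT B =====
-- B: incrementables = [i for i in range(4) if diffusion_prec[i] < 255]; pivot = last or -1;
-- then one comprehension over enumerate(diffusion_prec).
-- (diffusion_prec[i] is read with pyGetD; exact inside Pre_, where indices 0..3 are in range.)
def calcul_sous_reseau_suivant_alt (diffusion_prec : List Int) : List Int :=
  let incrementables := (PySem.List.pyRange 0 4 1).filter
    (fun i => PySem.List.pyGetD diffusion_prec i 0 < 255)
  let pivot := match incrementables.getLast? with
    | some p => p
    | none => -1
  (PySem.List.enumerate diffusion_prec).map (fun p =>
    if p.1 = pivot then p.2 + 1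
    else if pivot < p.1 ∧ p.1 ≤ 3 then 0
    else p.2)

-- ===== PRECONDITION & SPEC =====
-- Pre_ excludes lists shorter than four elements, on which the Python A raises IndexError.
def Pre_calcul_sous_reseau_suivant (diffusion_prec : List Int) : Prop :=
  4 ≤ diffusion_prec.length
instance (diffusion_prec : List Int) : Decidable (Pre_calcul_sous_reseau_suivant diffusion_prec) := by unfold Pre_calcul_sous_reseau_suivant; infer_instance
def pvWitness_calcul_sous_reseau_suivant : List Int := [192, 168, 0, 255]

def Spec_calcul_sous_reseau_suivant (diffusion_prec : List Int) (out : List Int) : Prop := out = calcul_sous_reseau_suivant_alt diffusion_prec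
instance (diffusion_prec : List Int) (out : List Int) : Decidable (Spec_calcul_sous_reseau_suivant diffusion_prec out) := by unfold Spec_calcul_sous_reseau_suivant; infer_instance

-- ===== CLAIM (what is proved, stated in full; the proofs are below) =====
def Claim_equal_calcul_sous_reseau_suivant : Prop := ∀ (diffusion_prec : List Int), Dom_calcul_sous_reseau_suivant diffusion_prec → Pre_calcul_sous_reseau_suivant diffusion_prec → Spec_calcul_sous_reseau_suivant diffusion_prec (calcul_sous_reseau_suivant diffusion_prec)

-- ===== LEMMAS AND PROOFS =====
theorem pyRangeA_eval : PySem.List.pyRange 3 (-1) (-1) = [3, 2, 1, 0] := by decide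

theorem pyRangeB_eval : PySem.List.pyRange 0 4 1 = [0, 1, 2, 3] := by decide

-- the comprehension is the identity on positions past index 3
theorem tail_id (pivot : Int) (hp : pivot ≤ 3) (rest : List Int) :
    ∀ (s : Int), 4 ≤ s →
      (PySem.List.enumerate rest s).map (fun p =>
        if p.1 = pivot then p.2 + 1
        else if pivot < p.1 ∧ p.1 ≤ 3 then 0
        else p.2) = rest := by
  induction rest with
  | nil => intro s _; simp [PySem.List.enumerate_nil]
  | cons x xs ih =>
    intro s hs
    have h1 : ¬ (s = pivot) := by omega
    have h2 : ¬ (pivot < s ∧ s ≤ 3) := by omega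
    simp [PySem.List.enumerate_cons, h1, h2, ih (s + 1) (by omega)]

theorem main_eq (a b c e : Int) (rest : List Int) :
    calcul_sous_reseau_suivant (a :: b :: c :: e :: rest)
      = calcul_sous_reseau_suivant_alt (a :: b :: c :: e :: rest) := by
  have q0 : ((0:Int) ≤ (rest.length:Int) + 1) := by omega
  have q1 : ((0:Int) ≤ (rest.length:Int) + 1 + 1) := by omega
  have h0 : ((0:Int) ≤ (rest.length:Int) + 1 + 1 + 1) := by omega
  have h1 : ((1:Int) ≤ (rest.length:Int) + 1 + 1 + 1) := by omega
  have h2 : ((2:Int) ≤ (rest.length:Int) + 1 + 1 + 1) := by omega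
  have h3 : ((3:Int) ≤ (rest.length:Int) + 1 + 1 + 1) := by omega
  by_cases he : e < 255
  · simp [calcul_sous_reseau_suivant, calcul_sous_reseau_suivant_alt, pyRangeA_eval,
      pyRangeB_eval, calcA_loop, PySem.List.pyGetD, PySem.List.pyGet?, PySem.List.pyIdx?,
      PySem.List.pySetD, PySem.List.pySet?, PySem.List.enumerate_cons,
      q0, q1, h0, h1, h2, h3, he, tail_id 3 (by norm_num) rest 4 (by norm_num)]
  · by_cases hc : c < 255
    · simp [calcul_sous_reseau_suivant, calcul_sous_reseau_suivant_alt, pyRangeA_eval,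
        pyRangeB_eval, calcA_loop, PySem.List.pyGetD, PySem.List.pyGet?, PySem.List.pyIdx?,
        PySem.List.pySetD, PySem.List.pySet?, PySem.List.enumerate_cons,
        q0, q1, h0, h1, h2, h3, he, hc, tail_id 2 (by norm_num) rest 4 (by norm_num)]
    · by_cases hb : b < 255
      · simp [calcul_sous_reseau_suivant, calcul_sous_reseau_suivant_alt, pyRangeA_eval,
          pyRangeB_eval, calcA_loop, PySem.List.pyGetD, PySem.List.pyGet?, PySem.List.pyIdx?,
          PySem.List.pySetD, PySem.List.pySet?, PySem.List.enumerate_cons,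
          q0, q1, h0, h1, h2, h3, he, hc, hb, tail_id 1 (by norm_num) rest 4 (by norm_num)]
      · by_cases ha : a < 255
        · simp [calcul_sous_reseau_suivant, calcul_sous_reseau_suivant_alt, pyRangeA_eval,
            pyRangeB_eval, calcA_loop, PySem.List.pyGetD, PySem.List.pyGet?, PySem.List.pyIdx?,
            PySem.List.pySetD, PySem.List.pySet?, PySem.List.enumerate_cons,
            q0, q1, h0, h1, h2, h3, he, hc, hb, ha, tail_id 0 (by norm_num) rest 4 (by norm_num)]
        · simp [calcul_sous_reseau_suivant, calcul_sous_reseau_suivant_alt, pyRangeA_eval,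
            pyRangeB_eval, calcA_loop, PySem.List.pyGetD, PySem.List.pyGet?, PySem.List.pyIdx?,
            PySem.List.pySetD, PySem.List.pySet?, PySem.List.enumerate_cons,
            q0, q1, h0, h1, h2, h3, he, hc, hb, ha, tail_id (-1) (by norm_num) rest 4 (by norm_num)]

-- ===== VERDICT (by name: the statement is the Claim_ definition above) =====
theorem calcul_sous_reseau_suivant_spec : Claim_equal_calcul_sous_reseau_suivant := by
  intro d _ hpre
  match d, hpre with
  | a :: b :: c :: e :: rest, _ => exact main_eq a b c e rest
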